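-- pv_equiv track=rewrite | github.com/kitkat77/Xtreme-Tic-Tac-Toe | sanjana.py | weighted_cells
-- ===== SOURCE A (Python) =====
-- def weighted_cells(board, flag, board_type):
--
--     total_weight = 0
--
--     center = corner = other = 0
--     if board_type == "big":
--         center, corner, other = 6, 6, 6
--     else:
--         center, corner, other = 3, 4, 6
--     weights = [[corner,other,corner],[other,center,other],[corner,other,corner]]
--
--     for i in range(3):
--         for j in range(3):
--             if board[i][j] == flag:
--                 total_weight += weights[i][j]
--
--     return total_weight
-- ===== SOURCE B (Python) =====
-- def weighted_cells(board, flag, board_type):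
--     if board_type == "big":
--         center = corner = other = 6
--     else:
--         center, corner, other = 3, 4, 6
--     corners = sum(1 for i, j in ((0, 0), (0, 2), (2, 0), (2, 2)) if board[i][j] == flag)
--     edges = sum(1 for i, j in ((0, 1), (1, 0), (1, 2), (2, 1)) if board[i][j] == flag)
--     center_hit = 1 if board[1][1] == flag else 0
--     return corner * corners + other * edges + center * center_hit
-- ===== Notes on version B (the rewrite author's own statement) =====
-- stated objective: simpler
-- what changed: B drops the 3x3 weight matrix and the nested index loop; it classifies the nine cells by position (4 corners, 4 edges, center), counts matches in each group and returns a three-term weighted sum.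
import Mathlib
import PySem

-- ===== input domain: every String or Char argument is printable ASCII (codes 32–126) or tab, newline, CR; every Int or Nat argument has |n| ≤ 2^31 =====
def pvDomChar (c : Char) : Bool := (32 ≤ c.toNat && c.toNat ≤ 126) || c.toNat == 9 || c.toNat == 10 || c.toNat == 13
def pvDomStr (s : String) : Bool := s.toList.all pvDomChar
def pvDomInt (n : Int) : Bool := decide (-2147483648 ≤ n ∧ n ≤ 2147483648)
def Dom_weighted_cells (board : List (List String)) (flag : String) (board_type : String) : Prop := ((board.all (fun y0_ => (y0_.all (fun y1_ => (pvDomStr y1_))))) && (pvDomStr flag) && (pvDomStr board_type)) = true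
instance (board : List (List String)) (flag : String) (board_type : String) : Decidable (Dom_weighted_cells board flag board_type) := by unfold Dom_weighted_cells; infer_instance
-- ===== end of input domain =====

-- B replaces A's 3x3 weight matrix and nested index loop by three position-group
-- counts (corners / edges / center) combined in one weighted sum: simpler.
set_option maxHeartbeats 1000000


-- ===== PORT A =====
-- literal transliteration of A: weight matrix, nested for i/j over range(3),
-- board[i][j]/weights[i][j] via pyGet? (the .getD defaults are unreachable under Pre_).
def weighted_cells (board : List (List String)) (flag : String) (board_type : String) : Int :=
  let cco : Int × Int × Int := if board_type == "big" then (6, 6, 6) else (3, 4, 6)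
  let center := cco.1; let corner := cco.2.1; let other := cco.2.2
  let weights : List (List Int) :=
    [[corner, other, corner], [other, center, other], [corner, other, corner]]
  (PySem.List.pyRange 0 3 1).foldl (fun tw i =>
    (PySem.List.pyRange 0 3 1).foldl (fun tw j =>
      if ((PySem.List.pyGet? ((PySem.List.pyGet? board i).getD []) j).getD "") == flag then
        tw + ((PySem.List.pyGet? ((PySem.List.pyGet? weights i).getD []) j).getD 0)
      else tw) tw) 0

-- ===== PORT B =====
-- B-side helper: board[i][j] (defaults unreachable under Pre_)
def cellB (board : List (List String)) (i j : Int) : String :=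
  ((PySem.List.pyGet? ((PySem.List.pyGet? board i).getD []) j).getD "")

def weighted_cells_alt (board : List (List String)) (flag : String) (board_type : String) : Int :=
  let cco : Int × Int × Int := if board_type == "big" then (6, 6, 6) else (3, 4, 6)
  let corners : Int :=
    (([((0:Int), (0:Int)), (0, 2), (2, 0), (2, 2)]).countP
      (fun p => cellB board p.1 p.2 == flag) : Nat)
  let edges : Int :=
    (([((0:Int), (1:Int)), (1, 0), (1, 2), (2, 1)]).countP
      (fun p => cellB board p.1 p.2 == flag) : Nat)
  let center_hit : Int := if cellB board 1 1 == flag then 1 else 0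
  cco.2.1 * corners + cco.2.2 * edges + cco.1 * center_hit

-- ===== PRECONDITION & SPEC =====
-- A raises IndexError unless the board has at least 3 rows whose first three rows
-- have at least 3 cells each; Pre_ admits exactly the inputs where A returns.
def Pre_weighted_cells (board : List (List String)) (flag : String) (board_type : String) : Prop :=
  3 ≤ board.length ∧ ∀ r ∈ board.take 3, 3 ≤ r.length
instance (board : List (List String)) (flag : String) (board_type : String) : Decidable (Pre_weighted_cells board flag board_type) := by unfold Pre_weighted_cells; infer_instance

def pvWitness_weighted_cells : List (List String) × String × String :=
  ([["x", "o", "x"], ["o", "x", "o"], ["x", "o", "o"]], "x", "big")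

def Spec_weighted_cells (board : List (List String)) (flag : String) (board_type : String) (out : Int) : Prop := out = weighted_cells_alt board flag board_type
instance (board : List (List String)) (flag : String) (board_type : String) (out : Int) : Decidable (Spec_weighted_cells board flag board_type out) := by unfold Spec_weighted_cells; infer_instance

-- ===== CLAIM (what is proved, stated in full; the proofs are below) =====
def Claim_equal_weighted_cells : Prop := ∀ (board : List (List String)) (flag : String) (board_type : String), Dom_weighted_cells board flag board_type → Pre_weighted_cells board flag board_type → Spec_weighted_cells board flag board_type (weighted_cells board flag board_type)

-- ===== LEMMAS AND PROOFS =====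

-- evaluation of pyGet? at the literal indices 0,1,2 on a 3-element spine (proof helper)
theorem pvGet3 {α : Type} (x y z : α) (t : List α) :
    (PySem.List.pyGet? (x :: y :: z :: t) 0 = some x)
    ∧ (PySem.List.pyGet? (x :: y :: z :: t) 1 = some y)
    ∧ (PySem.List.pyGet? (x :: y :: z :: t) 2 = some z) := by
  refine ⟨?_, ?_, ?_⟩
  · have h := PySem.List.pyGet?_ofNat (xs := x :: y :: z :: t) (n := 0) (by simp)
    exact h
  · have h := PySem.List.pyGet?_ofNat (xs := x :: y :: z :: t) (n := 1) (by simp)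
    simpa using h
  · have h := PySem.List.pyGet?_ofNat (xs := x :: y :: z :: t) (n := 2) (by simp)
    simpa using h

-- hoists the loop accumulator out of A's branch (proof helper; keeps terms linear)
theorem ite_add_shift (c : Prop) [inst : Decidable c] (tw w : Int) :
    (if c then tw + w else tw) = tw + (if c then w else 0) := by split <;> simp

-- ===== VERDICT (by name: the statement is the Claim_ definition above) =====
theorem weighted_cells_spec : Claim_equal_weighted_cells := by
  intro board flag board_type _ hpre
  obtain ⟨hlen, hrows⟩ := hpre
  obtain ⟨r0, r1, r2, rest, rfl⟩ :
      ∃ r0 r1 r2 rest, board = r0 :: r1 :: r2 :: rest := by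
    match board, hlen with
    | r0 :: r1 :: r2 :: rest, _ => exact ⟨r0, r1, r2, rest, rfl⟩
  have h0 := hrows r0 (by simp)
  have h1 := hrows r1 (by simp)
  have h2 := hrows r2 (by simp)
  obtain ⟨a0, a1, a2, t0, rfl⟩ : ∃ a b c t, r0 = a :: b :: c :: t := by
    match r0, h0 with | a :: b :: c :: t, _ => exact ⟨a, b, c, t, rfl⟩
  obtain ⟨b0, b1, b2, t1, rfl⟩ : ∃ a b c t, r1 = a :: b :: c :: t := by
    match r1, h1 with | a :: b :: c :: t, _ => exact ⟨a, b, c, t, rfl⟩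
  obtain ⟨c0, c1, c2, t2, rfl⟩ : ∃ a b c t, r2 = a :: b :: c :: t := by
    match r2, h2 with | a :: b :: c :: t, _ => exact ⟨a, b, c, t, rfl⟩
  have hr : PySem.List.pyRange 0 3 1 = [0, 1, 2] := by decide
  show _ = _
  simp only [weighted_cells, weighted_cells_alt, cellB, hr, List.foldl, ite_add_shift,
    List.countP, List.countP.go, pvGet3, Option.getD_some, Bool.cond_eq_ite, beq_iff_eq]
  by_cases hbt : board_type = "big" <;>
    simp only [hbt, if_true, if_false] <;>
    · split_ifs <;> push_cast
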